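-- pv_equiv track=rewrite | github.com/dyleeeeeeee/kaos-fibo | backend/algorithms/lzw_coding.py | convert_lzw_to_binary
-- ===== SOURCE A (Python) =====
-- def convert_lzw_to_binary(codes):
--     """
--     Convert LZW codes to binary string for fair comparison
--
--     Uses variable-length encoding based on dictionary size
--
--     Args:
--         codes (list): List of LZW codes
--
--     Returns:
--         str: Binary string representation
--     """
--     if not codes:
--         return ''
--
--     binary_parts = []
--
--     # Start with 9 bits (256 initial codes + need for growth)
--     current_bits = 9
--     max_code = (1 << current_bits) - 1
--
--     for code in codes:
--         # Increase bit width if necessary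
--         while code > max_code:
--             current_bits += 1
--             max_code = (1 << current_bits) - 1
--
--         # Convert code to binary with current bit width
--         binary = format(code, f'0{current_bits}b')
--         binary_parts.append(binary)
--
--     return ''.join(binary_parts)
-- ===== SOURCE B (Python) =====
-- def convert_lzw_to_binary(codes):
--     """
--     Convert LZW codes to binary string (run-segmentation version).
--
--     Instead of tracking a per-code width, repeatedly scan for the first code
--     that overflows the current width, emit the whole constant-width run before
--     it in one shot, emit the overflowing code at its own bit length, and
--     continue after it with the wider width.
--     """
--     parts = []
--     bits = 9
--     rest = codes
--     while rest:
--         limit = (1 << bits) - 1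
--         j = next((i for i, c in enumerate(rest) if c > limit), len(rest))
--         parts.append(''.join(format(c, f'0{bits}b') for c in rest[:j]))
--         if j == len(rest):
--             break
--         bits = rest[j].bit_length()
--         parts.append(format(rest[j], f'0{bits}b'))
--         rest = rest[j+1:]
--     return ''.join(parts)
-- ===== Notes on version B (the rewrite author's own statement) =====
-- stated objective: alternative
-- what changed: Replaces A's per-code pass with a stateful inner unary widening loop by run segmentation: B repeatedly scans for the first code overflowing the current width, emits the whole constant-width run before it in one join, emits that code at its own bit length, and continues on the suffix after it.
import Mathlib
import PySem

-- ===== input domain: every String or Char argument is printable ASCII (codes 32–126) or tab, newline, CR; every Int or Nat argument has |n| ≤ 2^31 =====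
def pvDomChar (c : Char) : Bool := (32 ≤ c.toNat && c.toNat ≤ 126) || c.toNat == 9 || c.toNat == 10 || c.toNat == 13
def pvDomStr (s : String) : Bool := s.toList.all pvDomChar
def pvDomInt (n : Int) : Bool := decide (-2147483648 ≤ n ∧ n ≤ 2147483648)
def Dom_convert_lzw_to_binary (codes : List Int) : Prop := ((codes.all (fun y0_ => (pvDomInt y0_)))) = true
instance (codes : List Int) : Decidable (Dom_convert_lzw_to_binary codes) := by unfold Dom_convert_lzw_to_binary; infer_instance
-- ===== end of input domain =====

-- B replaces A's per-code width tracking (an inner unary while-loop per code) by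
-- run segmentation: it repeatedly finds the first code overflowing the current
-- width, emits the whole constant-width run before it in one shot, emits that
-- code at its own bit length, and continues after it (objective: alternative).


-- ===== PORT A =====
-- Python's format(code, f'0{bits}b'): zero-padded binary; a negative code is
-- rendered as '-' followed by |code| in binary, the sign counting toward the width.
def pyFormat0b (code : Int) (bits : Nat) : String :=
  if code < 0 then
    let d := Nat.toDigits 2 code.natAbs
    String.mk ('-' :: (List.replicate (bits - 1 - d.length) '0' ++ d))
  else
    let d := Nat.toDigits 2 code.toNat
    String.mk (List.replicate (bits - d.length) '0' ++ d)

-- A's inner 'while code > max_code: current_bits += 1; max_code = (1 << current_bits) - 1',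
-- with the loop invariant max_code = 2^current_bits - 1 inlined.
def growA (code : Int) (bits : Nat) : Nat :=
  if code > 2 ^ bits - 1 then growA code (bits + 1) else bits
termination_by code.toNat + 1 - 2 ^ bits
decreasing_by
  have _h1 : (2:Nat) ^ (bits + 1) = 2 * 2 ^ bits := by ring
  have h2 : (1:Nat) ≤ 2 ^ bits := Nat.one_le_two_pow
  have h3 : (((2:Nat) ^ bits : Nat) : Int) ≤ code := by push_cast; omega
  have h4 : (2:Nat) ^ bits ≤ code.toNat := by omega
  omega

def convert_lzw_to_binary (codes : List Int) : String :=
  if codes = [] then "" else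
    String.join (codes.foldl
      (fun (st : Nat × List String) code =>
        let bits := growA code st.1
        (bits, st.2 ++ [pyFormat0b code bits]))
      (9, [])).2

-- ===== PORT B =====
-- the while-loop of Source B: find the first code over the current limit, emit the
-- run before it at the current width, emit it at its bit length, continue after it
def goB (bits : Nat) (rest : List Int) : List String :=
  if hne : rest = [] then []
  else
    let limit : Int := 2 ^ bits - 1
    let j := rest.findIdx (fun c => limit < c)
    let chunk := String.join ((rest.take j).map (fun c => pyFormat0b c bits))
    if j = rest.length then [chunk]
    else
      let c := rest.getD j 0
      let bits' := PySem.Int.bitLength c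
      chunk :: pyFormat0b c bits' :: goB bits' (rest.drop (j + 1))
termination_by rest.length
decreasing_by
  simp only [List.length_drop]
  cases rest with
  | nil => exact absurd rfl hne
  | cons x xs => simp only [List.length_cons]; omega

def convert_lzw_to_binary_alt (codes : List Int) : String :=
  String.join (goB 9 codes)

-- ===== PRECONDITION & SPEC =====
def Spec_convert_lzw_to_binary (codes : List Int) (out : String) : Prop := out = convert_lzw_to_binary_alt codes
instance (codes : List Int) (out : String) : Decidable (Spec_convert_lzw_to_binary codes out) := by unfold Spec_convert_lzw_to_binary; infer_instance

-- ===== CLAIM (what is proved, stated in full; the proofs are below) =====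
def Claim_equal_convert_lzw_to_binary : Prop := ∀ (codes : List Int), Dom_convert_lzw_to_binary codes → Spec_convert_lzw_to_binary codes (convert_lzw_to_binary codes)

-- ===== LEMMAS AND PROOFS =====

-- proof-side specification: the per-code parts A produces, as a simple recursion
def specList (codes : List Int) (bits : Nat) : List String :=
  match codes with
  | [] => []
  | c :: rest =>
    let b := growA c bits
    pyFormat0b c b :: specList rest b

theorem foldA_eq : ∀ (codes : List Int) (bits : Nat) (parts : List String),
    (codes.foldl
      (fun (st : Nat × List String) code =>
        let b := growA code st.1
        (b, st.2 ++ [pyFormat0b code b]))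
      (bits, parts)).2
    = parts ++ specList codes bits := by
  intro codes
  induction codes with
  | nil => intro bits parts; simp [specList]
  | cons c rest ih =>
    intro bits parts
    simp only [List.foldl_cons, specList]
    rw [ih]
    simp

theorem growA_of_le (c : Int) (bits : Nat) (h : ¬ ((2:Int) ^ bits - 1 < c)) :
    growA c bits = bits := by
  rw [growA, if_neg h]

theorem bitLength_ge_one (a : Int) (h2 : 2 ≤ a.natAbs) : 1 ≤ PySem.Int.bitLength a := by
  have := PySem.Int.lt_two_pow_bitLength a
  by_contra h; push_neg at h; interval_cases (PySem.Int.bitLength a) <;> omega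

theorem bitLength_eq_succ (a : Int) (bits : Nat)
    (h1 : 2 ^ bits ≤ a.natAbs) (h2 : a.natAbs < 2 ^ (bits + 1)) :
    PySem.Int.bitLength a = bits + 1 := by
  have hne : a ≠ 0 := by
    intro h; subst h; simp at h1
  have hu := PySem.Int.lt_two_pow_bitLength a
  have hl := PySem.Int.two_pow_bitLength_le a hne
  set w := PySem.Int.bitLength a with hw
  have hbw : bits < w := by
    by_contra hc
    push_neg at hc
    have : (2:Nat) ^ w ≤ 2 ^ bits := Nat.pow_le_pow_right (by norm_num) hc
    omega
  have hwb : w - 1 < bits + 1 := by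
    by_contra hc
    push_neg at hc
    have : (2:Nat) ^ (bits + 1) ≤ 2 ^ (w - 1) := Nat.pow_le_pow_right (by norm_num) hc
    omega
  omega

theorem growA_of_gt (c : Int) (bits : Nat) (hb : 1 ≤ bits) (h : (2:Int) ^ bits - 1 < c) :
    growA c bits = PySem.Int.bitLength c := by
  induction bits using growA.induct (code := c) with
  | case1 bits h1 ih =>
    rw [growA, if_pos h1]
    by_cases h2 : (2:Int) ^ (bits + 1) - 1 < c
    · exact ih (by omega) h2
    · rw [growA, if_neg h2]
      have hcast : (((2:Nat) ^ bits : Nat) : Int) = (2:Int) ^ bits := by push_cast; ring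
      have hcast2 : (((2:Nat) ^ (bits + 1) : Nat) : Int) = (2:Int) ^ (bits + 1) := by push_cast; ring
      have hp : (1:Nat) ≤ 2 ^ bits := Nat.one_le_two_pow
      have hge : ((2:Nat) ^ bits : Int) ≤ c := by omega
      have hpos : (0:Int) < c := by omega
      have hna : c.natAbs = c.toNat := by omega
      have h1' : 2 ^ bits ≤ c.natAbs := by omega
      have h2' : c.natAbs < 2 ^ (bits + 1) := by omega
      exact (bitLength_eq_succ c bits h1' h2').symm
  | case2 bits h1 => exact absurd h h1

-- a run of codes all within the current limit contributes constant-width parts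
-- and does not change the width for what follows
theorem specList_run (xs ys : List Int) (bits : Nat)
    (hall : ∀ c ∈ xs, ¬ ((2:Int) ^ bits - 1 < c)) :
    specList (xs ++ ys) bits = xs.map (fun c => pyFormat0b c bits) ++ specList ys bits := by
  induction xs with
  | nil => simp
  | cons x xs ih =>
    have hx : ¬ ((2:Int) ^ bits - 1 < x) := hall x (by simp)
    simp only [List.cons_append, specList, growA_of_le x bits hx, List.map_cons, List.cons_append]
    rw [ih (fun c hc => hall c (by simp [hc]))]

-- String.join distributes over cons/append (needed to reassemble B's run chunks)
theorem str_foldl_append (l : List String) (a b : String) :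
    l.foldl (· ++ ·) (a ++ b) = a ++ l.foldl (· ++ ·) b := by
  induction l generalizing b with
  | nil => simp
  | cons x xs ih => simp only [List.foldl_cons, String.append_assoc, ih]

theorem str_join_cons (s : String) (l : List String) :
    String.join (s :: l) = s ++ String.join l := by
  simp only [String.join, List.foldl_cons]
  have := str_foldl_append l s ""
  simpa using this

theorem str_join_append (xs l : List String) :
    String.join (xs ++ l) = String.join xs ++ String.join l := by
  induction xs with
  | nil => simp [String.join]
  | cons x t ih => simp only [List.cons_append, str_join_cons, ih, String.append_assoc]

-- B's while-loop produces exactly the join of A's per-code parts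
theorem goB_eq (rest : List Int) (bits : Nat) (hb : 1 ≤ bits) :
    String.join (goB bits rest) = String.join (specList rest bits) := by
  induction hn : rest.length using Nat.strong_induction_on generalizing rest bits with
  | _ n ih =>
  by_cases hne : rest = []
  · subst hne; simp [goB, specList]
  · rw [goB, dif_neg hne]
    simp only
    set p : Int → Bool := fun c => decide ((2:Int) ^ bits - 1 < c) with hp
    set j := rest.findIdx p with hj
    have hall : ∀ c ∈ rest.take j, ¬ ((2:Int) ^ bits - 1 < c) := by
      intro c hc
      obtain ⟨i, hi, hci⟩ := List.getElem_of_mem hc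
      rw [List.length_take] at hi
      have hij : i < j := lt_of_lt_of_le hi (min_le_left _ _)
      have hil : i < rest.length := lt_of_lt_of_le hi (min_le_right _ _)
      have hf : p rest[i] = false := List.not_of_lt_findIdx hij
      rw [List.getElem_take] at hci
      rw [hci] at hf
      simpa [hp] using hf
    by_cases hend : j = rest.length
    · rw [if_pos hend]
      have htake : rest.take j = rest := by rw [hend]; simp
      have hs : specList rest bits = rest.map (fun c => pyFormat0b c bits) := by
        have h2 : ∀ c ∈ rest, ¬ ((2:Int) ^ bits - 1 < c) := by
          intro c hc; exact hall c (by rw [htake]; exact hc)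
        have := specList_run rest [] bits h2
        simpa [specList] using this
      rw [htake, hs]
      simp [String.join]
    · rw [if_neg hend]
      have hjl : j < rest.length := Nat.lt_of_le_of_ne (List.findIdx_le_length) hend
      have hpj : p rest[j] = true := List.findIdx_getElem
      have hgt : (2:Int) ^ bits - 1 < rest[j] := by simpa [hp] using hpj
      have hget : rest.getD j 0 = rest[j] := List.getD_eq_getElem rest 0 hjl
      have hsplit : rest = rest.take j ++ rest[j] :: rest.drop (j + 1) := by
        conv_lhs => rw [← List.take_append_drop j rest]
        rw [List.drop_eq_getElem_cons hjl]
      have hb1 : (1:Int) ≤ (2:Int) ^ bits - 1 := by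
        have : (2:Int) ^ 1 ≤ 2 ^ bits := pow_le_pow_right₀ (by norm_num) hb
        omega
      have hna2 : 2 ≤ (rest[j]).natAbs := by omega
      have hbl1 : 1 ≤ PySem.Int.bitLength rest[j] := bitLength_ge_one _ hna2
      have hlen : (rest.drop (j + 1)).length < n := by
        simp only [List.length_drop]; omega
      have hrec := ih _ hlen (rest.drop (j + 1)) (PySem.Int.bitLength rest[j]) hbl1 rfl
      conv_rhs => rw [hsplit]
      rw [specList_run _ _ bits hall]
      simp only [specList]
      rw [growA_of_gt rest[j] bits hb hgt, hget, str_join_cons, str_join_cons, hrec,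
        str_join_append, str_join_cons]

-- ===== VERDICT (by name: the statement is the Claim_ definition above) =====
theorem convert_lzw_to_binary_spec : Claim_equal_convert_lzw_to_binary := by
  intro codes _
  unfold Spec_convert_lzw_to_binary convert_lzw_to_binary convert_lzw_to_binary_alt
  by_cases h : codes = []
  · subst h; simp [goB, String.join]
  · rw [if_neg h, foldA_eq codes 9 [], List.nil_append, goB_eq codes 9 (by norm_num)]
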